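-- pv_equiv track=rewrite | github.com/nezort11/problems | leetcode/remove-palindromic-subsequences/main.py | get_min_steps_to_empty_by_palindrom
-- ===== SOURCE A (Python) =====
-- def is_palindrom(s):
--     for i in range(len(s) // 2):
--         if s[i] != s[-i - 1]:
--             return False
--     return True
--
-- def get_palindroms_from_start(s):
--     result = []
--     for i in range(1, len(s)):
--         if is_palindrom(s[0:i]):
--             result.append(i)
--
--     return result
--
-- def get_min_steps_to_empty_by_palindrom(s):
--     """
--     Find minimum number of palindrom subsequences that form given string.
--     """
--     # Base case
--     if is_palindrom(s):
--         return 1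
--
--     # Recursive case
--     return min(
--         [
--             1 + get_min_steps_to_empty_by_palindrom(s[p:])
--             for p in get_palindroms_from_start(s)
--         ]
--     )
-- ===== SOURCE B (Python) =====
-- def get_min_steps_to_empty_by_palindrom(s):
--     """
--     Find minimum number of palindrom subsequences that form given string.
--
--     Bottom-up DP over suffixes: dp holds the answers for the suffixes
--     s[i+1:], ..., s[n:]; for each i the best first palindromic piece is chosen.
--     """
--     n = len(s)
--     dp = [0]  # answer for the empty suffix s[n:]
--     for i in range(n - 1, -1, -1):
--         best = None
--         for k in range(len(dp)):
--             sub = s[i:i + 1 + k]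
--             if sub == sub[::-1]:
--                 cand = dp[k] + 1
--                 if best is None or cand < best:
--                     best = cand
--         dp = [best] + dp
--     return dp[0]
-- ===== Notes on version B (the rewrite author's own statement) =====
-- stated objective: faster
-- what changed: Replaced the exponential unmemoized recursion over palindromic-prefix splits by a bottom-up O(n^3) dynamic program that fills a table of answers for all suffixes once.
-- intended difference: On the empty string A returns 1 (because is_palindrom('') is vacuously true), while B returns 0, the intended number of palindromic pieces needed to form an empty string. — e.g. on get_min_steps_to_empty_by_palindrom(""): A returns 1, B returns 0
import Mathlib
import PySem

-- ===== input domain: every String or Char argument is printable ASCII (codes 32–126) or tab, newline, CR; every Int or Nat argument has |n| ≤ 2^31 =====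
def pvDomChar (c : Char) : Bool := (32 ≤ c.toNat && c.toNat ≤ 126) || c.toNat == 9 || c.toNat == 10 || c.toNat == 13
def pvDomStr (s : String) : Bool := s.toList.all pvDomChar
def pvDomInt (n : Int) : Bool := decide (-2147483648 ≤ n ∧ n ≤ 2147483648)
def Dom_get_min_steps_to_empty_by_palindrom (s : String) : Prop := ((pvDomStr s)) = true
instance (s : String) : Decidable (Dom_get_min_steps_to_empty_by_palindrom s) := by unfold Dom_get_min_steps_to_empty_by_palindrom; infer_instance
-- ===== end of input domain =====

-- B replaces A's unmemoized recursion over palindromic-prefix splits by a bottom-up suffix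
-- DP (a different, table-filling algorithm); intended difference: on "" A returns 1, B returns 0.

-- ===== PORT A =====
-- is_palindrom(s): loop over range(len(s)//2) comparing s[i] with s[-i-1]
-- (the early 'return False' loop is the .all fold over the same range)
def pvIsPal (l : List Char) : Bool :=
  (PySem.List.pyRange 0 (PySem.Int.floordiv (l.length : Int) 2) 1).all
    (fun i => PySem.List.pyGet? l i == PySem.List.pyGet? l (-i - 1))

-- get_palindroms_from_start(s): collect i in range(1, len(s)) with is_palindrom(s[0:i])
def pvPalStarts (l : List Char) : List Int :=
  (PySem.List.pyRange 1 (l.length : Int) 1).foldl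
    (fun res i => if pvIsPal (PySem.List.slice l (some 0) (some i)) then res ++ [i] else res) []

-- the next three facts are needed by pvGoA's termination (cited in decreasing_by)
theorem pvPalStarts_eq_filter (l : List Char) :
    pvPalStarts l = (PySem.List.pyRange 1 (l.length : Int) 1).filter
      (fun i => pvIsPal (PySem.List.slice l (some 0) (some i))) := by
  unfold pvPalStarts
  rw [PySem.List.foldl_append_if_eq_filter]
  simp

theorem pvPalStarts_mem_bounds {l : List Char} {p : Int} (hp : p ∈ pvPalStarts l) :
    1 ≤ p ∧ p < (l.length : Int) := by
  rw [pvPalStarts_eq_filter] at hp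
  exact PySem.List.mem_pyRange_one.mp (List.mem_filter.mp hp).1

theorem pvGoA_dec {l : List Char} {p : Int} (hp : p ∈ pvPalStarts l) :
    (PySem.List.slice l (some p) none).length < l.length := by
  obtain ⟨h1, h2⟩ := pvPalStarts_mem_bounds hp
  rw [PySem.List.slice_from l (show (0:Int) ≤ p by omega)]
  simp only [List.length_drop]
  omega

-- recursive case: min([1 + go(s[p:]) for p in get_palindroms_from_start(s)]); the candidate
-- list is nonempty whenever it is reached (p = 1 is always a palindromic prefix there), so
-- min? is never none and the getD 0 is inert.
def pvGoA (l : List Char) : Int :=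
  if pvIsPal l then 1
  else
    ((PySem.List.min?
      ((pvPalStarts l).attach.map
        (fun p => 1 + pvGoA (PySem.List.slice l (some p.val) none)))
      (fun x => x))).getD 0
termination_by l.length
decreasing_by exact pvGoA_dec p.property

-- one ∈ palStarts whenever l is not a palindrome

def get_min_steps_to_empty_by_palindrom (s : String) : Int := pvGoA s.toList

-- ===== PORT B =====
-- running minimum: 'if best is None or cand < best: best = cand'
def pvMinStep (best : Option Int) (cand : Int) : Option Int :=
  match best with
  | none => some cand
  | some b => if cand < b then some cand else some b

-- inner loop: for k in range(len(dp)): sub = s[i:i+1+k]; if sub == sub[::-1] (reverse, cf.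
-- PySem.List.slice?_none_none_neg_one): cand = dp[k] + 1.  dp[k] is always in range here,
-- so pyGetD with default 0 is exact.
def pvBest (cs : List Char) (i : Int) (dp : List Int) : Option Int :=
  (PySem.List.pyRange 0 (dp.length : Int) 1).foldl
    (fun best k =>
      let sub := PySem.List.slice cs (some i) (some (i + 1 + k))
      if sub = sub.reverse then pvMinStep best (PySem.List.pyGetD dp k 0 + 1) else best)
    none

-- outer loop: for i in range(n-1, -1, -1): dp = [best] + dp  (best is never None: the
-- single-character piece always qualifies, so the getD 0 is inert); return dp[0]
def get_min_steps_to_empty_by_palindrom_alt (s : String) : Int :=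
  let cs := s.toList
  let n : Int := (cs.length : Int)
  let dp := (PySem.List.pyRange (n - 1) (-1) (-1)).foldl
    (fun dp i => ((pvBest cs i dp).getD 0) :: dp) [0]
  PySem.List.pyGetD dp 0 0

-- ===== PRECONDITION & SPEC =====
-- On the empty string A returns 1 (is_palindrom('') is vacuously true), while B returns 0,
-- the intended number of palindromic pieces forming the empty string.
def D_get_min_steps_to_empty_by_palindrom (s : String) : Prop := s = ""
instance (s : String) : Decidable (D_get_min_steps_to_empty_by_palindrom s) := by
  unfold D_get_min_steps_to_empty_by_palindrom; infer_instance

def Spec_get_min_steps_to_empty_by_palindrom (s : String) (out : Int) : Prop :=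
  ¬ D_get_min_steps_to_empty_by_palindrom s → out = get_min_steps_to_empty_by_palindrom_alt s
instance (s : String) (out : Int) : Decidable (Spec_get_min_steps_to_empty_by_palindrom s out) := by
  unfold Spec_get_min_steps_to_empty_by_palindrom; infer_instance

def pvDiffWitness_get_min_steps_to_empty_by_palindrom : String := ""
def pvDiffWitnessOut_get_min_steps_to_empty_by_palindrom : Int × Int := (1, 0)

-- ===== CLAIM (what is proved, stated in full; the proofs are below) =====
def Claim_unchanged_get_min_steps_to_empty_by_palindrom : Prop := ∀ (s : String), Dom_get_min_steps_to_empty_by_palindrom s → Spec_get_min_steps_to_empty_by_palindrom s (get_min_steps_to_empty_by_palindrom s)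
def Claim_changed_get_min_steps_to_empty_by_palindrom : Prop := Dom_get_min_steps_to_empty_by_palindrom (pvDiffWitness_get_min_steps_to_empty_by_palindrom) ∧ D_get_min_steps_to_empty_by_palindrom (pvDiffWitness_get_min_steps_to_empty_by_palindrom) ∧ get_min_steps_to_empty_by_palindrom (pvDiffWitness_get_min_steps_to_empty_by_palindrom) = pvDiffWitnessOut_get_min_steps_to_empty_by_palindrom.1 ∧ get_min_steps_to_empty_by_palindrom_alt (pvDiffWitness_get_min_steps_to_empty_by_palindrom) = pvDiffWitnessOut_get_min_steps_to_empty_by_palindrom.2 ∧ pvDiffWitnessOut_get_min_steps_to_empty_by_palindrom.1 ≠ pvDiffWitnessOut_get_min_steps_to_empty_by_palindrom.2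
def Claim_exact_get_min_steps_to_empty_by_palindrom : Prop := ∀ (s : String), Dom_get_min_steps_to_empty_by_palindrom s → D_get_min_steps_to_empty_by_palindrom s → get_min_steps_to_empty_by_palindrom s ≠ get_min_steps_to_empty_by_palindrom_alt s

-- ===== LEMMAS AND PROOFS =====

theorem pvIsPal_iff (l : List Char) : pvIsPal l = true ↔ l.reverse = l := by
  unfold pvIsPal
  have hfd : PySem.Int.floordiv (l.length : Int) 2 = ((l.length / 2 : Nat) : Int) := by
    exact_mod_cast PySem.Int.floordiv_natCast l.length 2
  rw [hfd, PySem.List.pyRange_zero_natCast, List.all_map, List.all_eq_true]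
  have hcond : ∀ k : Nat, k < l.length / 2 →
      ((PySem.List.pyGet? l ((k:Int)) == PySem.List.pyGet? l (-(k:Int) - 1)) = true ↔
        l[k]? = l[l.length - 1 - k]?) := by
    intro k hk
    have hlen : k + 1 ≤ l.length := by omega
    have hneg : -(k:Int) - 1 = -((k+1 : Nat) : Int) := by push_cast; ring
    rw [hneg, PySem.List.pyGet?_neg_natCast l (k+1) (by omega) hlen, PySem.List.pyGet?_natCast]
    have : l.length - (k+1) = l.length - 1 - k := by omega
    rw [this, beq_iff_eq]
  constructor
  · intro h
    have half : ∀ k : Nat, k < l.length / 2 → l[k]? = l[l.length - 1 - k]? := by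
      intro k hk
      exact (hcond k hk).mp (h _ (List.mem_range.mpr hk))
    apply List.ext_getElem?
    intro i
    by_cases hi : i < l.length
    · rw [List.getElem?_reverse hi]
      by_cases h1 : i < l.length / 2
      · exact (half i h1).symm
      · by_cases h2 : l.length - 1 - i < l.length / 2
        · have := half _ h2
          have he : l.length - 1 - (l.length - 1 - i) = i := by omega
          rw [he] at this
          exact this
        · rw [show l.length - 1 - i = i by omega]
    · rw [List.getElem?_eq_none (by simpa using hi), List.getElem?_eq_none (by omega)]
  · intro h x hx
    simp only [List.mem_range] at hx
    rw [Function.comp_apply, hcond x hx]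
    conv_lhs => rw [← h]
    exact List.getElem?_reverse (by omega)

theorem one_mem_palStarts {l : List Char} (h : pvIsPal l = false) : (1:Int) ∈ pvPalStarts l := by
  have hlen : 2 ≤ l.length := by
    by_contra hc
    have : l.reverse = l := by
      interval_cases hl : l.length
      · simp [List.length_eq_zero_iff.mp hl]
      · obtain ⟨a, ha⟩ := List.length_eq_one_iff.mp hl
        simp [ha]
    rw [← pvIsPal_iff] at this
    simp [this] at h
  rw [pvPalStarts_eq_filter, List.mem_filter]
  refine ⟨PySem.List.mem_pyRange_one.mpr (by constructor <;> [omega; exact_mod_cast by omega]), ?_⟩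
  have : PySem.List.slice l (some 0) (some 1) = l.take 1 := by
    rw [PySem.List.slice_toNat l (by omega) (by omega)]
    simp
  simp only [this]
  rw [pvIsPal_iff]
  match l, hlen with
  | a :: rest, _ => simp

theorem pvGoA_pos : ∀ (l : List Char), 1 ≤ pvGoA l := by
  intro l
  induction l using (measure List.length).wf.induction with
  | _ l ih =>
  unfold pvGoA
  split
  · omega
  · rename_i hnp
    have hnp' : pvIsPal l = false := by simpa using hnp
    set L := (pvPalStarts l).attach.map
        (fun p => 1 + pvGoA (PySem.List.slice l (some p.val) none)) with hL
    have hne : L ≠ [] := by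
      simp only [hL, ne_eq, List.map_eq_nil_iff, List.attach_eq_nil_iff]
      intro hc
      exact absurd (one_mem_palStarts hnp') (by rw [hc]; simp)
    obtain ⟨m, hm⟩ : ∃ m, PySem.List.min? L (fun x => x) = some m := by
      cases hminr : PySem.List.min? L (fun x => x) with
      | none => exact absurd ((PySem.List.min?_eq_none_iff L _).mp hminr) hne
      | some m => exact ⟨m, rfl⟩
    rw [hm]
    have := PySem.List.min?_mem hm
    simp only [hL, List.mem_map, List.mem_attach, true_and] at this
    obtain ⟨⟨p, hp⟩, hval⟩ := this
    simp only [Option.getD_some]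
    rw [← hval]
    have h2 : 1 ≤ pvGoA (PySem.List.slice l (some ((Subtype.mk p hp : {x // x ∈ pvPalStarts l}).val)) none) :=
      ih _ (pvGoA_dec hp)
    omega

theorem pvFold_filter {α : Type} (p : α → Prop) [DecidablePred p] (f : α → Int) :
    ∀ (xs : List α) (b : Option Int),
      xs.foldl (fun best k => if p k then pvMinStep best (f k) else best) b
        = ((xs.filter (fun k => decide (p k))).map f).foldl pvMinStep b := by
  intro xs
  induction xs with
  | nil => intro b; simp
  | cons x t ih =>
    intro b
    by_cases hx : p x <;> simp [hx, ih]

theorem pvMinStep_foldl_some : ∀ (t : List Int) (b : Int),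
    t.foldl pvMinStep (some b) = some (t.foldl min b) := by
  intro t
  induction t with
  | nil => intro b; rfl
  | cons x t ih =>
    intro b
    have : pvMinStep (some b) x = some (min b x) := by
      show (if x < b then some x else some b) = some (min b x)
      split_ifs with h <;> [rw [min_eq_right (by omega)]; rw [min_eq_left (by omega)]]
    simp only [List.foldl_cons, this, ih]

theorem pvMinStep_eq_min? (ys : List Int) :
    ys.foldl pvMinStep none = PySem.List.min? ys (fun y => y) := by
  cases ys with
  | nil => rfl
  | cons x t => rw [PySem.List.min?_id_cons, List.foldl_cons]; exact pvMinStep_foldl_some t x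

theorem best_step (cs : List Char) (j : Nat) (hj : j < cs.length) :
    (pvBest cs (j:Int)
        ((List.range (cs.length - 1 - j)).map (fun k => pvGoA (cs.drop (j+1+k))) ++ [0])).getD 0
      = pvGoA (cs.drop j) := by
  set t := cs.drop j with ht
  set m := cs.length - j with hm
  have hm1 : 1 ≤ m := by omega
  have htlen : t.length = m := by simp [ht, hm]
  set dpA := (List.range (cs.length - 1 - j)).map (fun k => pvGoA (cs.drop (j+1+k))) with hdpA
  have hdpAlen : dpA.length = m - 1 := by simp [hdpA]; omega
  set dp := dpA ++ [0] with hdp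
  have hdplen : dp.length = m := by simp [hdp, hdpAlen]; omega
  -- the inner-loop condition as a Nat predicate on t
  set C : Nat → Bool := fun k => decide ((t.take (k+1)).reverse = t.take (k+1)) with hC
  -- sub at k (k < m) is t.take (k+1)
  have hsub : ∀ k : Nat, PySem.List.slice cs (some (j:Int)) (some ((j:Int) + 1 + (k:Int)))
      = t.take (k+1) := by
    intro k
    have : (j:Int) + 1 + (k:Int) = ((j + (k+1) : Nat) : Int) := by push_cast; ring
    rw [this, PySem.List.slice_natCast]
    rw [ht]
    congr 1
    omega
  -- dp entries
  have hdpget : ∀ k : Nat, k < m - 1 → dp.getD k 0 = pvGoA (t.drop (k+1)) := by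
    intro k hk
    rw [hdp, List.getD_append dpA [0] 0 k (by omega), hdpA]
    rw [List.getD_eq_getElem _ _ (by simp; omega)]
    simp only [List.getElem_map, List.getElem_range]
    rw [ht, List.drop_drop, show j + (k+1) = j+1+k by omega]
  have hdplast : dp.getD (m-1) 0 = 0 := by
    rw [hdp, show m - 1 = dpA.length by omega]
    simp [List.getD]
  -- rewrite the fold into min? of the candidate list
  have hfold : pvBest cs (j:Int) dp
      = PySem.List.min? (((List.range m).filter C).map (fun k => dp.getD k 0 + 1)) (fun y => y) := by
    unfold pvBest
    rw [show ((dp.length : Int)) = ((m : Nat) : Int) by rw [hdplen]]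
    rw [PySem.List.pyRange_zero_natCast, List.foldl_map]
    have := pvFold_filter
      (fun k : Nat => PySem.List.slice cs (some (j:Int)) (some ((j:Int) + 1 + (k:Int)))
          = (PySem.List.slice cs (some (j:Int)) (some ((j:Int) + 1 + (k:Int)))).reverse)
      (fun k : Nat => PySem.List.pyGetD dp (k:Int) 0 + 1) (List.range m) none
    rw [this]
    rw [pvMinStep_eq_min?]
    congr 1
    have hfC : ∀ k ∈ List.range m,
        (decide (PySem.List.slice cs (some (j:Int)) (some ((j:Int) + 1 + (k:Int)))
          = (PySem.List.slice cs (some (j:Int)) (some ((j:Int) + 1 + (k:Int)))).reverse)) = C k := by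
      intro k _
      rw [hsub k, hC]
      simp only [decide_eq_decide]
      exact eq_comm
    rw [List.filter_congr hfC]
    apply List.map_congr_left
    intro k hk
    rw [PySem.List.pyGetD_natCast]
  rw [hfold]
  have hdp_nonneg : ∀ k : Nat, 0 ≤ dp.getD k 0 := by
    intro k
    by_cases hk : k < dp.length
    · rw [List.getD_eq_getElem _ _ hk]
      have hmem : dp[k] ∈ dpA ++ [0] := by rw [← hdp]; exact List.getElem_mem hk
      rcases List.mem_append.mp hmem with h | h
      · rw [hdpA] at h
        obtain ⟨a, _, ha⟩ := List.mem_map.mp h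
        rw [← ha]
        have := pvGoA_pos (cs.drop (j+1+a))
        omega
      · simp at h
        omega
    · rw [List.getD_eq_default _ _ (by omega)]
  conv_rhs => rw [pvGoA]
  by_cases hpal : pvIsPal t
  · -- whole suffix is a palindrome: both sides are 1
    rw [if_pos hpal]
    have hCm : C (m-1) = true := by
      simp only [hC]
      have : t.take (m-1+1) = t := by
        rw [show m - 1 + 1 = m by omega, ← htlen]
        exact List.take_length
      rw [this]
      simpa using (pvIsPal_iff t).mp hpal
    have h1mem : (1:Int) ∈ ((List.range m).filter C).map (fun k => dp.getD k 0 + 1) := by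
      apply List.mem_map.mpr
      refine ⟨m-1, List.mem_filter.mpr ⟨List.mem_range.mpr (by omega), hCm⟩, ?_⟩
      rw [hdplast]
      norm_num
    obtain ⟨v, hv⟩ : ∃ v, PySem.List.min? (((List.range m).filter C).map (fun k => dp.getD k 0 + 1)) (fun y => y) = some v := by
      cases hmr : PySem.List.min? (((List.range m).filter C).map (fun k => dp.getD k 0 + 1)) (fun y => y) with
      | none =>
        rw [PySem.List.min?_eq_none_iff] at hmr
        rw [hmr] at h1mem
        exact absurd h1mem (List.not_mem_nil)
      | some v => exact ⟨v, rfl⟩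
    rw [hv, Option.getD_some]
    have hle : v ≤ 1 := PySem.List.min?_isMin hv 1 h1mem
    have hvm := PySem.List.min?_mem hv
    obtain ⟨a, _, ha⟩ := List.mem_map.mp hvm
    have := hdp_nonneg a
    omega
  · -- not a palindrome: the two candidate lists are equal
    rw [if_neg hpal]
    have hLA : (pvPalStarts t).attach.map
        (fun p => 1 + pvGoA (PySem.List.slice t (some p.val) none))
        = ((List.range (m-1)).filter C).map (fun k => 1 + pvGoA (t.drop (k+1))) := by
      rw [List.attach_map_val (f := fun p : Int => 1 + pvGoA (PySem.List.slice t (some p) none))]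
      rw [pvPalStarts_eq_filter, htlen]
      rw [PySem.List.pyRange_one 1 (m:Int)]
      rw [show ((m:Int) - 1).toNat = m - 1 by omega]
      rw [List.filter_map, List.map_map]
      have hfun : ((fun p : Int => 1 + pvGoA (PySem.List.slice t (some p) none)) ∘ fun k : Nat => 1 + (k:Int))
          = fun k : Nat => 1 + pvGoA (t.drop (k+1)) := by
        funext k
        simp only [Function.comp_apply]
        have hb : (1:Int) + (k:Int) = ((k+1 : Nat) : Int) := by push_cast; ring
        rw [hb, PySem.List.slice_from_natCast]
      have hfilt : List.filter
            ((fun i : Int => pvIsPal (PySem.List.slice t (some 0) (some i))) ∘ fun k : Nat => 1 + (k:Int))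
            (List.range (m-1))
          = List.filter C (List.range (m-1)) := by
        apply List.filter_congr
        intro k hk
        simp only [Function.comp_apply]
        have hb : (1:Int) + (k:Int) = ((k+1 : Nat) : Int) := by push_cast; ring
        rw [hb, PySem.List.slice_zero_start, PySem.List.slice_to_natCast]
        simp only [hC]
        rcases h : decide ((t.take (k+1)).reverse = t.take (k+1)) with _ | _
        · simp only [decide_eq_false_iff_not] at h
          exact Bool.eq_false_iff.mpr (fun hc => h ((pvIsPal_iff _).mp hc))
        · simp only [decide_eq_true_eq] at h
          exact (pvIsPal_iff _).mpr h
      rw [hfun, hfilt]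
    rw [hLA]
    have hCm : C (m-1) = false := by
      simp only [hC]
      have : t.take (m-1+1) = t := by
        rw [show m - 1 + 1 = m by omega, ← htlen]
        exact List.take_length
      rw [this]
      simp only [decide_eq_false_iff_not]
      intro hc
      exact hpal ((pvIsPal_iff t).mpr hc)
    have hrange : List.range m = List.range (m-1) ++ [m-1] := by
      conv_lhs => rw [show m = (m-1) + 1 by omega]
      exact List.range_succ
    rw [hrange, List.filter_append]
    simp only [List.filter_cons, hCm, Bool.false_eq_true, if_false, List.filter_nil, List.append_nil]
    congr 1
    congr 1
    apply List.map_congr_left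
    intro k hk
    have hkm : k < m - 1 := List.mem_range.mp (List.mem_filter.mp hk).1
    rw [hdpget k hkm]
    ring

theorem pyRange_neg_one_snoc (a b : Int) (h : b < a) :
    PySem.List.pyRange a b (-1) = PySem.List.pyRange a (b+1) (-1) ++ [b+1] := by
  rw [PySem.List.pyRange_neg_one_eq_reverse, PySem.List.pyRange_one_cons (by omega),
    List.reverse_cons, PySem.List.pyRange_neg_one_eq_reverse]

theorem dp_inv (cs : List Char) : ∀ m : Nat, m ≤ cs.length →
    (PySem.List.pyRange ((cs.length : Int) - 1) ((cs.length : Int) - 1 - (m : Int)) (-1)).foldl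
      (fun dp i => ((pvBest cs i dp).getD 0) :: dp) [0]
    = (List.range m).map (fun k => pvGoA (cs.drop (cs.length - m + k))) ++ [0] := by
  intro m
  induction m with
  | zero =>
    intro _
    rw [show ((cs.length : Int) - 1 - ((0:Nat) : Int)) = (cs.length : Int) - 1 by push_cast; ring]
    rw [PySem.List.pyRange_neg_one_eq_nil (by omega)]
    rfl
  | succ m ih =>
    intro hm
    have hsnoc : PySem.List.pyRange ((cs.length : Int) - 1) ((cs.length : Int) - 1 - ((m+1 : Nat) : Int)) (-1)
        = PySem.List.pyRange ((cs.length : Int) - 1) ((cs.length : Int) - 1 - (m : Int)) (-1)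
          ++ [((cs.length - 1 - m : Nat) : Int)] := by
      rw [pyRange_neg_one_snoc _ _ (by push_cast; omega)]
      congr 2 <;> (push_cast; omega)
    rw [hsnoc, List.foldl_append, ih (by omega), List.foldl_cons, List.foldl_nil]
    have hb := best_step cs (cs.length - 1 - m) (by omega)
    rw [show cs.length - 1 - (cs.length - 1 - m) = m by omega] at hb
    rw [show (fun k => pvGoA (List.drop (cs.length - 1 - m + 1 + k) cs))
        = (fun k => pvGoA (List.drop (cs.length - m + k) cs)) from
      funext fun k => by rw [show cs.length - 1 - m + 1 + k = cs.length - m + k by omega]] at hb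
    rw [hb]
    rw [show m + 1 = m.succ from rfl, List.range_succ_eq_map]
    simp only [List.map_cons, List.map_map, List.cons_append]
    rw [show cs.length - (m+1) + 0 = cs.length - 1 - m by omega]
    congr 1
    congr 1
    apply List.map_congr_left
    intro a ha
    simp only [Function.comp_apply]
    rw [show cs.length - (m+1) + (a+1) = cs.length - m + a by omega]

theorem alt_eq (s : String) (h : s.toList ≠ []) :
    get_min_steps_to_empty_by_palindrom_alt s = pvGoA s.toList := by
  unfold get_min_steps_to_empty_by_palindrom_alt
  have hn : 1 ≤ s.toList.length := by
    cases hcs : s.toList with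
    | nil => exact absurd hcs h
    | cons a l => simp
  have hinv := dp_inv s.toList s.toList.length le_rfl
  rw [show ((s.toList.length : Int) - 1 - (s.toList.length : Int)) = -1 from by ring] at hinv
  simp only []
  rw [hinv]
  have hr : List.range s.toList.length = 0 :: (List.range (s.toList.length - 1)).map Nat.succ := by
    conv_lhs => rw [show s.toList.length = (s.toList.length - 1) + 1 by omega, List.range_succ_eq_map]
  rw [hr]
  simp only [List.map_cons, List.cons_append]
  rw [show s.toList.length - s.toList.length + 0 = 0 by omega, List.drop_zero]
  simp [PySem.List.pyGetD]

theorem pvA_empty : get_min_steps_to_empty_by_palindrom "" = 1 := by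
  unfold get_min_steps_to_empty_by_palindrom
  rw [show ("" : String).toList = [] from by simp]
  rw [pvGoA, if_pos (show pvIsPal [] = true from by decide)]

theorem pvB_empty : get_min_steps_to_empty_by_palindrom_alt "" = 0 := by
  unfold get_min_steps_to_empty_by_palindrom_alt
  rw [show ("" : String).toList = [] from by simp]
  rfl

-- ===== VERDICT (by name: the statement is the Claim_ definition above) =====
theorem get_min_steps_to_empty_by_palindrom_spec : Claim_unchanged_get_min_steps_to_empty_by_palindrom := by
  intro s _ hD
  have h : s.toList ≠ [] := fun h0 => hD (String.toList_eq_nil_iff.mp h0)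
  unfold get_min_steps_to_empty_by_palindrom
  exact (alt_eq s h).symm

theorem get_min_steps_to_empty_by_palindrom_changed : Claim_changed_get_min_steps_to_empty_by_palindrom := by
  unfold Claim_changed_get_min_steps_to_empty_by_palindrom
  refine ⟨by simp [Dom_get_min_steps_to_empty_by_palindrom, pvDomStr, pvDiffWitness_get_min_steps_to_empty_by_palindrom], rfl, pvA_empty, pvB_empty, by decide⟩

theorem get_min_steps_to_empty_by_palindrom_tight : Claim_exact_get_min_steps_to_empty_by_palindrom := by
  intro s _ hD
  rw [hD, pvA_empty, pvB_empty]
  decide
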